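-- pv_equiv track=rewrite | github.com/hamelin92/TIL | code_/kakao/kakao18_secret.py | solution
-- ===== SOURCE A (Python) =====
-- def solution(n, arr1, arr2):
-- 	answer = []
-- 	complete = [arr1[i]|arr2[i] for i in range(n)]
-- 	for l in complete:
-- 		trans = ''
-- 		for i in range(n):
-- 			if 2**(n-i-1)& l:
-- 				trans += '#'
-- 			else:
-- 				trans += ' '
-- 		answer.append(trans)
-- 	return answer
-- ===== SOURCE B (Python) =====
-- def solution(n, arr1, arr2):
--     if n <= 0:
--         return []
--     mask = (1 << n) - 1
--     table = str.maketrans('10', '# ')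
--     return [format((a | b) & mask, '0{}b'.format(n)).translate(table)
--             for a, b in zip(arr1[:n], arr2[:n])]
-- ===== Notes on version B (the rewrite author's own statement) =====
-- stated objective: faster
-- what changed: Each row is rendered at once by zero-padded binary formatting of the masked OR plus a character translation table, instead of A's inner loop that recomputes the big-int power 2**(n-i-1) and tests it for every bit position.
import Mathlib
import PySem

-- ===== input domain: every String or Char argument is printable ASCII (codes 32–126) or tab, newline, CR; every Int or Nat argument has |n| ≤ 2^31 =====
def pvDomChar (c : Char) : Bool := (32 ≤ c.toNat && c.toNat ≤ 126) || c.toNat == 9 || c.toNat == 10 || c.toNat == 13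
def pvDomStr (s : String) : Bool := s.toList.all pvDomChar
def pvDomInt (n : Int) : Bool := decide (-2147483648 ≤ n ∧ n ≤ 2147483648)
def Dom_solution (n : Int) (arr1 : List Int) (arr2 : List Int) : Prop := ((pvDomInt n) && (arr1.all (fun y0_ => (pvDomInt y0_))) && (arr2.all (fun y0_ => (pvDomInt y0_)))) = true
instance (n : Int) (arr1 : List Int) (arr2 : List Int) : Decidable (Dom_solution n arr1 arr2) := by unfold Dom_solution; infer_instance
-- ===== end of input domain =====

-- B renders each row at once: zero-padded binary formatting of the masked OR, then a character
-- translation '1'→'#' / '0'→' ', instead of A's per-bit power-of-two test loop (objective: alternative/idiomatic).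

-- ===== PORT A =====
-- 2**(n-i-1): the exponent is nonnegative for every i produced by range(n), so .toNat is exact there.
def solution (n : Int) (arr1 : List Int) (arr2 : List Int) : List String :=
  let complete := (PySem.List.pyRange 0 n 1).map (fun i =>
    PySem.Int.bor (PySem.List.pyGetD arr1 i 0) (PySem.List.pyGetD arr2 i 0))
  complete.foldl (fun answer l =>
    let trans := (PySem.List.pyRange 0 n 1).foldl (fun trans i =>
      trans ++ (if PySem.Int.band ((2:Int)^(n - i - 1).toNat) l ≠ 0 then "#" else " ")) ""
    answer ++ [trans]) []

-- ===== PORT B =====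
-- Hand port of format(x, '0{w}b') for x ≥ 0 (exact there): binary digits LSB-first by repeated
-- halving (structural fuel = x, enough since x/2 < x), reversed, then zero-padded to width w.
def binRevAux : Nat → Nat → List Char
  | _, 0 => []
  | 0, _ + 1 => []
  | fuel + 1, m + 1 => (if (m + 1) % 2 = 1 then '1' else '0') :: binRevAux fuel ((m + 1) / 2)

def fmtBin (w m : Nat) : List Char :=
  let s := if m = 0 then ['0'] else (binRevAux m m).reverse
  List.replicate (w - s.length) '0' ++ s

-- str.maketrans('10', '# ') applied per character.
def trChar (c : Char) : Char := if c = '1' then '#' else if c = '0' then ' ' else c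

-- (a | b) & mask is nonnegative because mask ≥ 0, so .toNat is exact before formatting.
def solution_alt (n : Int) (arr1 : List Int) (arr2 : List Int) : List String :=
  if n ≤ 0 then []
  else
    let N := n.toNat
    let mask : Int := ((1:Int) <<< N) - 1
    (List.zip (arr1.take N) (arr2.take N)).map (fun p =>
      let m := PySem.Int.band (PySem.Int.bor p.1 p.2) mask
      String.ofList ((fmtBin N m.toNat).map trChar))

-- ===== PRECONDITION & SPEC =====
-- A indexes arr1[i], arr2[i] for every i in range(n): it raises IndexError iff 0 < n and an array
-- is shorter than n; Pre_ excludes exactly those inputs (for n ≤ 0 it holds and A returns []).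
def Pre_solution (n : Int) (arr1 : List Int) (arr2 : List Int) : Prop :=
  n ≤ (arr1.length : Int) ∧ n ≤ (arr2.length : Int)
instance (n : Int) (arr1 : List Int) (arr2 : List Int) : Decidable (Pre_solution n arr1 arr2) := by
  unfold Pre_solution; infer_instance
def pvWitness_solution : Int × List Int × List Int := (3, [5, 2, 7], [1, 4, 3])

def Spec_solution (n : Int) (arr1 : List Int) (arr2 : List Int) (out : List String) : Prop :=
  out = solution_alt n arr1 arr2
instance (n : Int) (arr1 : List Int) (arr2 : List Int) (out : List String) :
    Decidable (Spec_solution n arr1 arr2 out) := by unfold Spec_solution; infer_instance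

-- ===== CLAIM (what is proved, stated in full; the proofs are below) =====
def Claim_equal_solution : Prop := ∀ (n : Int) (arr1 : List Int) (arr2 : List Int),
  Dom_solution n arr1 arr2 → Pre_solution n arr1 arr2 →
  Spec_solution n arr1 arr2 (solution n arr1 arr2)

-- ===== LEMMAS AND PROOFS =====

lemma binRevAux_fuel : ∀ (f f' m : Nat), m ≤ f → m ≤ f' → binRevAux f m = binRevAux f' m := by
  intro f
  induction f with
  | zero => intro f' m h _; interval_cases m; cases f' <;> rfl
  | succ f ih =>
    intro f' m hf hf'
    match m, f' with
    | 0, f' => cases f' <;> rfl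
    | m + 1, f' + 1 =>
      simp only [binRevAux, List.cons.injEq, true_and]
      exact ih f' ((m + 1) / 2) (by omega) (by omega)

lemma binRev_succ (m : Nat) :
    binRevAux (m + 1) (m + 1) =
      (if (m + 1) % 2 = 1 then '1' else '0') :: binRevAux ((m + 1) / 2) ((m + 1) / 2) := by
  simp only [binRevAux, List.cons.injEq, true_and]
  exact binRevAux_fuel m ((m + 1) / 2) ((m + 1) / 2) (by omega) (by omega)

lemma binRev_pad : ∀ (N m : Nat), m < 2 ^ N →
    binRevAux m m ++ List.replicate (N - (binRevAux m m).length) '0' =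
      (List.range N).map (fun j => if m.testBit j then '1' else '0') := by
  intro N
  induction N with
  | zero =>
    intro m hm
    interval_cases m
    rfl
  | succ N ih =>
    intro m hm
    match m with
    | 0 =>
      simp [binRevAux, Nat.zero_testBit, List.map_eq_replicate_iff, List.eq_replicate_iff]
    | m + 1 =>
      rw [binRev_succ, List.range_succ_eq_map]
      have hlt : (m + 1) / 2 < 2 ^ N := by
        have : 2 ^ (N + 1) = 2 * 2 ^ N := by ring
        omega
      simp only [List.cons_append, List.length_cons, List.map_cons, List.map_map, List.cons.injEq]
      refine ⟨?_, ?_⟩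
      · rw [Nat.testBit_zero]
        rcases Nat.mod_two_eq_zero_or_one (m + 1) with h | h <;> simp [h]
      · rw [show N + 1 - ((binRevAux ((m+1)/2) ((m+1)/2)).length + 1)
              = N - (binRevAux ((m+1)/2) ((m+1)/2)).length by omega]
        rw [ih ((m + 1) / 2) hlt]
        apply List.map_congr_left
        intro j _
        simp [Function.comp, Nat.testBit_succ]

lemma reverse_map_range (N : Nat) (f : Nat → Char) :
    ((List.range N).map f).reverse = (List.range N).map (fun j => f (N - 1 - j)) := by
  apply List.ext_getElem (by simp)
  intro i h1 h2
  simp only [List.length_reverse, List.length_map, List.length_range] at h1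
  rw [List.getElem_reverse]
  simp only [List.getElem_map, List.getElem_range, List.length_map, List.length_range]

lemma fmtBin_eq (N m : Nat) (hN : 0 < N) (hm : m < 2 ^ N) :
    fmtBin N m = (List.range N).map (fun j => if m.testBit (N - 1 - j) then '1' else '0') := by
  unfold fmtBin
  match m with
  | 0 =>
    simp only [if_pos rfl, Nat.zero_testBit, List.length_singleton, Bool.false_eq_true, if_false]
    have h0 : (List.range N).map (fun _ : Nat => '0') = List.replicate N '0' := by
      simp [List.map_eq_replicate_iff]
    rw [h0, show N = (N - 1) + 1 by omega, List.replicate_succ']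
    simp
  | m + 1 =>
    rw [if_neg (by omega)]
    have hrev : List.replicate (N - ((binRevAux (m+1) (m+1)).reverse).length) '0'
          ++ (binRevAux (m+1) (m+1)).reverse
        = (binRevAux (m+1) (m+1) ++ List.replicate (N - (binRevAux (m+1) (m+1)).length) '0').reverse := by
      simp
    rw [hrev, binRev_pad N (m + 1) hm, reverse_map_range]

lemma testBit_mask_sub : ∀ (N u k : Nat), u < 2 ^ N → k < N →
    (2 ^ N - 1 - u).testBit k = !u.testBit k := by
  intro N
  induction N with
  | zero => intro u k _ hk; omega
  | succ N ih =>
    intro u k hu hk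
    have hpow : 2 ^ (N + 1) = 2 * 2 ^ N := by ring
    match k with
    | 0 =>
      simp only [Nat.testBit_zero]
      rw [hpow] at hu
      rcases Nat.mod_two_eq_zero_or_one u with h | h <;> simp [h, hpow] <;> omega
    | k + 1 =>
      rw [Nat.testBit_succ, Nat.testBit_succ,
        show (2 ^ (N + 1) - 1 - u) / 2 = 2 ^ N - 1 - u / 2 by omega]
      exact ih (u / 2) k (by omega) (by omega)

lemma toNat_two_pow (k : Nat) : ((2:Int) ^ k).toNat = 2 ^ k := by
  rw [show (2:Int) ^ k = ((2 ^ k : Nat) : Int) by push_cast; ring, Int.toNat_natCast]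

lemma mask_toNat (N : Nat) : ((2:Int) ^ N - 1).toNat = 2 ^ N - 1 := by
  rw [show (2:Int) ^ N - 1 = ((2 ^ N - 1 : Nat) : Int) by push_cast [Nat.one_le_two_pow]; ring,
    Int.toNat_natCast]

lemma mask_nonneg (N : Nat) : (0:Int) ≤ 2 ^ N - 1 := by
  have : (0:Int) < 2 ^ N := by positivity
  omega

lemma band_mask_toNat (l : Int) (N : Nat) :
    (PySem.Int.band l ((2:Int) ^ N - 1)).toNat =
      if 0 ≤ l then l.toNat % 2 ^ N else (2 ^ N - 1) - (-l - 1).toNat % 2 ^ N := by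
  have hm := mask_nonneg N
  rw [PySem.Int.band]
  split_ifs with h1
  · rw [Int.toNat_natCast, mask_toNat, Nat.and_two_pow_sub_one_eq_mod]
  · rw [Int.toNat_natCast, mask_toNat, Nat.and_comm, Nat.and_two_pow_sub_one_eq_mod]

lemma band_mask_lt (l : Int) (N : Nat) : (PySem.Int.band l ((2:Int) ^ N - 1)).toNat < 2 ^ N := by
  rw [band_mask_toNat]
  have h2N : 0 < 2 ^ N := by positivity
  split
  · exact Nat.mod_lt _ h2N
  · omega

lemma band_bridge (l : Int) (N k : Nat) (hk : k < N) :
    (PySem.Int.band ((2:Int) ^ k) l ≠ 0) ↔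
      ((PySem.Int.band l ((2:Int) ^ N - 1)).toNat.testBit k = true) := by
  rw [band_mask_toNat]
  have hp : (0:Int) ≤ 2 ^ k := by positivity
  have hk2 : 0 < 2 ^ k := by positivity
  rcases le_or_gt 0 l with hl | hl
  · rw [PySem.Int.band, if_pos hp, if_pos hl, if_pos hl, toNat_two_pow,
      Nat.and_comm, Nat.and_two_pow, Nat.testBit_mod_two_pow]
    cases hb : l.toNat.testBit k <;> simp [hb, hk] <;> omega
  · rw [if_neg (not_le.mpr hl)]
    rw [PySem.Int.band, if_pos hp, if_neg (not_le.mpr hl), toNat_two_pow, Nat.and_comm,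
      Nat.and_two_pow]
    have hcomp := testBit_mask_sub N ((-l - 1).toNat % 2 ^ N) k (Nat.mod_lt _ (by positivity)) hk
    rw [hcomp, Nat.testBit_mod_two_pow]
    cases hb : (-l - 1).toNat.testBit k <;> simp [hb, hk] <;> omega

lemma foldl_str_toList (g : Int → String) :
    ∀ (l : List Int) (s : String),
      (l.foldl (fun s i => s ++ g i) s).toList = s.toList ++ l.flatMap (fun i => (g i).toList) := by
  intro l
  induction l with
  | nil => intro s; simp
  | cons x xs ih =>
    intro s
    simp only [List.foldl_cons, List.flatMap_cons, ih, String.toList_append, List.append_assoc]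

lemma foldl_append_singleton {α β : Type} (f : α → β) :
    ∀ (l : List α) (init : List β), l.foldl (fun acc x => acc ++ [f x]) init = init ++ l.map f := by
  intro l
  induction l with
  | nil => intro init; simp
  | cons x xs ih => intro init; simp [ih]

lemma zip_take_eq (N : Nat) (arr1 arr2 : List Int) (h1 : N ≤ arr1.length) (h2 : N ≤ arr2.length) :
    List.zip (arr1.take N) (arr2.take N) =
      (List.range N).map (fun k => (arr1.getD k 0, arr2.getD k 0)) := by
  apply List.ext_getElem (by simp; omega)
  intro i hi1 hi2
  simp only [List.length_zip, List.length_take] at hi1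
  have hi : i < N := by omega
  simp [List.getElem_zip, List.getElem_take, List.getD_eq_getElem?_getD,
    List.getElem?_eq_getElem (by omega : i < arr1.length),
    List.getElem?_eq_getElem (by omega : i < arr2.length)]

lemma row_eq (N : Nat) (hN : 0 < N) (l : Int) :
    ((List.range N).map fun k =>
        if PySem.Int.band ((2:Int) ^ (N - 1 - k)) l ≠ 0 then '#' else ' ') =
      (fmtBin N (PySem.Int.band l ((2:Int) ^ N - 1)).toNat).map trChar := by
  rw [fmtBin_eq N _ hN (band_mask_lt l N), List.map_map]
  apply List.map_congr_left
  intro k hk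
  simp only [List.mem_range] at hk
  have hb := band_bridge l N (N - 1 - k) (by omega)
  by_cases h : PySem.Int.band ((2:Int) ^ (N - 1 - k)) l ≠ 0
  · rw [if_pos h]
    simp [Function.comp, hb.mp h, trChar]
  · rw [if_neg h]
    have hf : ¬ ((PySem.Int.band l ((2:Int) ^ N - 1)).toNat.testBit (N - 1 - k) = true) :=
      fun hc => h (hb.mpr hc)
    simp only [Bool.not_eq_true] at hf
    simp [Function.comp, hf, trChar]


lemma flatten_singletons {α β : Type} (g : α → β) :
    ∀ l : List α, (l.map (fun a => [g a])).flatten = l.map g := by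
  intro l; induction l with
  | nil => rfl
  | cons x xs ih => simp [ih]

lemma solution_eq_alt (n : Int) (arr1 : List Int) (arr2 : List Int)
    (h1 : n ≤ (arr1.length : Int)) (h2 : n ≤ (arr2.length : Int)) :
    solution n arr1 arr2 = solution_alt n arr1 arr2 := by
  unfold solution solution_alt
  by_cases hn : n ≤ 0
  · rw [if_pos hn, PySem.List.pyRange_one_eq_nil hn]
    simp
  · rw [if_neg hn]
    push_neg at hn
    have hnN : n = (n.toNat : Int) := by omega
    set N := n.toNat with hNdef
    have hN : 0 < N := by omega
    have h1' : N ≤ arr1.length := by omega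
    have h2' : N ≤ arr2.length := by omega
    dsimp only
    rw [foldl_append_singleton, zip_take_eq N arr1 arr2 h1' h2', List.nil_append]
    rw [hnN, PySem.List.pyRange_one 0 (N : Int)]
    simp only [Int.sub_zero, Int.toNat_natCast, List.map_map]
    apply List.map_congr_left
    intro k hk
    simp only [List.mem_range] at hk
    simp only [Function.comp, Int.zero_add, PySem.List.pyGetD_natCast]
    apply String.toList_inj.mp
    rw [foldl_str_toList]
    have hsh : ((1:Int) <<< N) - 1 = (2:Int) ^ N - 1 := by
      rw [Int.shiftLeft_eq, one_mul]
    rw [hsh]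
    set l := PySem.Int.bor (arr1.getD k 0) (arr2.getD k 0) with hl
    simp only [List.flatMap_map]
    have hflat : ((List.range N).flatMap fun (j : Nat) =>
        (if PySem.Int.band ((2:Int) ^ (((N:Int)) - (j:Int) - 1).toNat) l ≠ 0 then "#" else " ").toList) =
        (List.range N).map fun j =>
          if PySem.Int.band ((2:Int) ^ (N - 1 - j)) l ≠ 0 then '#' else ' ' := by
      rw [← flatten_singletons (fun j => if PySem.Int.band ((2:Int) ^ (N - 1 - j)) l ≠ 0 then '#' else ' ')
            (List.range N), List.flatMap_def]
      congr 1
      apply List.map_congr_left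
      intro j hj
      simp only [List.mem_range] at hj
      rw [show ((N:Int) - (j:Int) - 1).toNat = N - 1 - j by omega]
      split <;> rfl
    rw [hflat, row_eq N hN l]
    simp

-- ===== VERDICT (by name: the statement is the Claim_ definition above) =====
theorem solution_spec : Claim_equal_solution := by
  intro n arr1 arr2 _ hpre
  exact solution_eq_alt n arr1 arr2 hpre.1 hpre.2
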